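-- pv_equiv track=rewrite | github.com/knowgyu/problem-solving | 백준/Gold/1644. 소수의 연속합/소수의 연속합.py | count_prime_sums
-- ===== SOURCE A (Python) =====
-- def count_prime_sums(n, primes):
--     count, start, current_sum = 0, 0, 0
--     for end in range(len(primes)):
--         current_sum += primes[end]
--         while current_sum > n and start <= end:
--             current_sum -= primes[start]
--             start += 1
--         if current_sum == n:
--             count += 1
--     return count
-- ===== SOURCE B (Python) =====
-- def count_prime_sums(n, primes):
--     count = 0
--     queue = primes[::-1]   # input, reversed: pop() takes the original front
--     w_in = []              # two-stack window: newly arriving elements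
--     w_out = []             # reversed older half: pop() takes the window front
--     wsum = 0
--     grow = True            # next action: absorb the next element
--     while queue or not grow:
--         if grow:
--             p = queue.pop()
--             w_in.append(p)
--             wsum += p
--             grow = False
--         elif wsum > n and (w_out or w_in):
--             if not w_out:
--                 w_out = w_in[::-1]
--                 w_in = []
--             wsum -= w_out.pop()
--         else:
--             if wsum == n:
--                 count += 1
--             grow = True
--     return count
-- ===== Notes on version B (the rewrite author's own statement) =====
-- stated objective: alternative
-- what changed: B dismantles A's nested for/while two-pointer index scan into a single flat while-loop state machine over explicit data structures: a reversed input stack and the current window materialized as a two-stack queue, performing exactly one action (absorb / evict / close-and-count) per iteration, with no index arithmetic, no range loop and no nested loops.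
import Mathlib
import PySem

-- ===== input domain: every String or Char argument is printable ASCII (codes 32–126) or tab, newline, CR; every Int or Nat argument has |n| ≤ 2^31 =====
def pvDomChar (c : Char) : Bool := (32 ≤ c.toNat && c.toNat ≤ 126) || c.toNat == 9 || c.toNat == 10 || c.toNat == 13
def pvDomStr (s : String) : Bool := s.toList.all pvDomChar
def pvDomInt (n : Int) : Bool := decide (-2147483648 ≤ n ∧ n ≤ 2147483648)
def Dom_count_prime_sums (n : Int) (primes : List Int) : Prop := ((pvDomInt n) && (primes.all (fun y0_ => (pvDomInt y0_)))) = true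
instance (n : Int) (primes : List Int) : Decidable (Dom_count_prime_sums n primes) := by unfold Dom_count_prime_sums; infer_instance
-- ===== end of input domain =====

-- B recasts A's nested for/while two-pointer scan as a single flat while-loop state machine
-- over a materialized queue and window (one action per iteration, no indices); same results.

-- ===== PORT A =====
-- inner `while current_sum > n and start <= end:` loop of A
def shrinkA (n : Int) (primes : List Int) (endi : Int) (start : Int) (cur : Int) : Int × Int :=
  if cur > n ∧ start ≤ endi then
    shrinkA n primes endi (start + 1) (cur - PySem.List.pyGetD primes start 0)
  else (start, cur)
termination_by (endi + 1 - start).toNat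
decreasing_by omega

def count_prime_sums (n : Int) (primes : List Int) : Int :=
  ((PySem.List.pyRange 0 (primes.length : Int) 1).foldl
    (fun (acc : Int × Int × Int) endI =>
      let cur := acc.2.2 + PySem.List.pyGetD primes endI 0
      let sc := shrinkA n primes endI acc.2.1 cur
      (acc.1 + (if sc.2 = n then 1 else 0), sc.1, sc.2))
    (0, 0, 0)).1

-- ===== PORT B =====
-- `lst.pop()`: detach the last element (exact: Python pop() on a nonempty list; none = pop from empty)
def popLast? (xs : List Int) : Option (Int × List Int) :=
  match xs.reverse with
  | [] => none
  | y :: ys => some (y, ys.reverse)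

theorem popLast?_length (xs : List Int) (y : Int) (ys : List Int)
    (h : popLast? xs = some (y, ys)) : ys.length + 1 = xs.length := by
  unfold popLast? at h
  cases hrev : xs.reverse with
  | nil => rw [hrev] at h; exact absurd h (by simp)
  | cons z zs =>
    rw [hrev] at h
    have h1 : z = y ∧ zs.reverse = ys := by
      have := Option.some.inj h
      exact ⟨congrArg Prod.fst this, congrArg Prod.snd this⟩
    have h2 : xs.length = zs.length + 1 := by
      have := congrArg List.length hrev
      simpa using this
    rw [← h1.2]
    simp [h2]

-- `while queue or not grow:` with its one-action branches (absorb / flip-and-evict / close)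
def machineB (n : Int) (queue win wout : List Int) (wsum count : Int) (grow : Bool) : Int :=
  if queue ≠ [] ∨ grow = false then
    if grow then
      match hq : popLast? queue with
      | some (p, qs) => machineB n qs (win ++ [p]) wout (wsum + p) count false
      | none => count          -- unreachable: grow = true forces queue ≠ [] under the guard
    else if wsum > n ∧ (wout ≠ [] ∨ win ≠ []) then
      if wout = [] then
        match hw : popLast? win.reverse with
        | some (w, rest) => machineB n queue [] rest (wsum - w) count false
        | none => count        -- unreachable: the branch condition forces win ≠ []
      else
        match hw : popLast? wout with
        | some (w, rest) => machineB n queue win rest (wsum - w) count false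
        | none => count        -- unreachable: wout ≠ []
    else
      machineB n queue win wout wsum (count + (if wsum = n then 1 else 0)) true
  else count
termination_by 3 * queue.length + win.length + wout.length + (if grow then 0 else 1)
decreasing_by
  · have h := popLast?_length _ _ _ hq; simp_all; omega
  · have h := popLast?_length _ _ _ hw; simp_all; omega
  · have h := popLast?_length _ _ _ hw; simp_all; omega
  · simp_all

def count_prime_sums_alt (n : Int) (primes : List Int) : Int :=
  machineB n primes.reverse [] [] 0 0 true

-- ===== PRECONDITION & SPEC =====
def Spec_count_prime_sums (n : Int) (primes : List Int) (out : Int) : Prop := out = count_prime_sums_alt n primes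
instance (n : Int) (primes : List Int) (out : Int) : Decidable (Spec_count_prime_sums n primes out) := by unfold Spec_count_prime_sums; infer_instance

-- ===== CLAIM (what is proved, stated in full; the proofs are below) =====
def Claim_equal_count_prime_sums : Prop := ∀ (n : Int) (primes : List Int), Dom_count_prime_sums n primes → Spec_count_prime_sums n primes (count_prime_sums n primes)

-- ===== LEMMAS AND PROOFS =====

-- A's loop body, named for the proofs
def fA (n : Int) (primes : List Int) : Int × Int × Int → Int → Int × Int × Int :=
  fun acc endI =>
    let cur := acc.2.2 + PySem.List.pyGetD primes endI 0
    let sc := shrinkA n primes endI acc.2.1 cur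
    (acc.1 + (if sc.2 = n then 1 else 0), sc.1, sc.2)

theorem count_A_eq (n : Int) (primes : List Int) :
    count_prime_sums n primes
      = ((PySem.List.pyRange 0 (primes.length : Int) 1).foldl (fA n primes) (0, 0, 0)).1 := rfl

-- pure model of B's evict phase: pop from the window front while the sum exceeds n
def shrinkL (n : Int) : List Int → Int → List Int × Int
  | [], wsum => ([], wsum)
  | w :: ws, wsum => if wsum > n then shrinkL n ws (wsum - w) else (w :: ws, wsum)

-- A's index-pair shrink and B's window-list shrink compute the same thing:
-- on the window primes[start..k+1), shrinkA's result (s', cur') matches shrinkL's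
theorem shrink_corr (n : Int) (primes : List Int) (k : Nat) (hk : k < primes.length) :
    ∀ (d : Nat) (start : Int), 0 ≤ start → start ≤ (k : Int) + 1 →
      (((k : Int) + 1) - start).toNat = d →
      ∃ s' : Int, 0 ≤ s' ∧ s' ≤ (k : Int) + 1 ∧
        shrinkA n primes (k : Int) start (((primes.take (k + 1)).drop start.toNat).sum)
          = (s', ((primes.take (k + 1)).drop s'.toNat).sum) ∧
        shrinkL n ((primes.take (k + 1)).drop start.toNat)
            (((primes.take (k + 1)).drop start.toNat).sum)
          = (((primes.take (k + 1)).drop s'.toNat),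
             ((primes.take (k + 1)).drop s'.toNat).sum) := by
  have hlen : (primes.take (k + 1)).length = k + 1 := by
    simp [List.length_take]
    omega
  intro d
  induction d with
  | zero =>
    intro start h0 h1 hd
    have hs : start = (k : Int) + 1 := by omega
    have hnil : (primes.take (k + 1)).drop start.toNat = [] := by
      apply List.drop_eq_nil_of_le
      omega
    refine ⟨start, by omega, by omega, ?_, ?_⟩
    · rw [shrinkA, if_neg (by rintro ⟨-, h2⟩; omega)]
    · rw [hnil]
      simp [shrinkL]
  | succ d ih =>
    intro start h0 h1 hd
    have hsk : start ≤ (k : Int) := by omega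
    have hjlt : start.toNat < (primes.take (k + 1)).length := by omega
    have hseg : (primes.take (k + 1)).drop start.toNat
        = (primes.take (k + 1))[start.toNat] :: (primes.take (k + 1)).drop (start.toNat + 1) :=
      List.drop_eq_getElem_cons hjlt
    have hgetTake : (primes.take (k + 1))[start.toNat] = primes[start.toNat]'(by omega) := by
      simp [List.getElem_take]
    have hgd : PySem.List.pyGetD primes start 0 = primes[start.toNat]'(by omega) :=
      PySem.List.pyGetD_eq_getElem primes 0 h0 (by omega)
    by_cases hc : ((primes.take (k + 1)).drop start.toNat).sum > n
    · have hsum : ((primes.take (k + 1)).drop start.toNat).sum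
          = primes[start.toNat]'(by omega) + ((primes.take (k + 1)).drop (start.toNat + 1)).sum := by
        rw [hseg, List.sum_cons, hgetTake]
      have htn : (start + 1).toNat = start.toNat + 1 := by omega
      rcases ih (start + 1) (by omega) (by omega) (by omega) with ⟨s', hs0, hs1, hA, hL⟩
      rw [htn] at hA hL
      refine ⟨s', hs0, hs1, ?_, ?_⟩
      · rw [shrinkA, if_pos ⟨hc, hsk⟩]
        have harg : ((primes.take (k + 1)).drop start.toNat).sum - PySem.List.pyGetD primes start 0
            = ((primes.take (k + 1)).drop (start.toNat + 1)).sum := by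
          rw [hsum, hgd]; ring
        rw [harg]
        exact hA
      · rw [hseg]
        rw [shrinkL]
        rw [if_pos (by rw [← hseg]; exact hc)]
        have harg : (primes.take (k + 1))[start.toNat]
              + ((primes.take (k + 1)).drop (start.toNat + 1)).sum
              - (primes.take (k + 1))[start.toNat]
            = ((primes.take (k + 1)).drop (start.toNat + 1)).sum := by ring
        rw [List.sum_cons, harg]
        exact hL
    · refine ⟨start, h0, h1, ?_, ?_⟩
      · rw [shrinkA, if_neg (by rintro ⟨h2, -⟩; exact hc h2)]
      · rw [hseg, shrinkL, if_neg (by rw [← hseg]; exact hc), ← hseg]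

-- computation rules for popLast? (Python pop()) on the two shapes the proofs meet
theorem popLast?_reverse_cons (x : Int) (xs : List Int) :
    popLast? ((x :: xs).reverse) = some (x, xs.reverse) := by
  unfold popLast?
  simp

theorem popLast?_concat (ys : List Int) (y : Int) :
    popLast? (ys ++ [y]) = some (y, ys) := by
  unfold popLast?
  simp

theorem shrinkL_id (n : Int) (seg : List Int) (wsum : Int)
    (h : ¬(wsum > n ∧ seg ≠ [])) : shrinkL n seg wsum = (seg, wsum) := by
  cases seg with
  | nil => rfl
  | cons z zs =>
    rw [shrinkL, if_neg (by intro hc; exact h ⟨hc, by simp⟩)]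

-- from a non-grow state, the machine flips/evicts per `shrinkL` on the logical window
-- wout.reverse ++ win, counts once, and re-enters grow with the same logical window
theorem machineB_evict (n : Int) (queue : List Int) :
    ∀ (m : Nat) (win wout : List Int) (wsum c : Int), win.length + wout.length = m →
      ∃ win' wout' : List Int,
        wout'.reverse ++ win' = (shrinkL n (wout.reverse ++ win) wsum).1 ∧
        machineB n queue win wout wsum c false
          = machineB n queue win' wout' (shrinkL n (wout.reverse ++ win) wsum).2
              (c + (if (shrinkL n (wout.reverse ++ win) wsum).2 = n then 1 else 0)) true := by
  intro m
  induction m with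
  | zero =>
    intro win wout wsum c hm
    have hwin : win = [] := by
      cases win with
      | nil => rfl
      | cons a l => simp at hm
    have hwout : wout = [] := by
      cases wout with
      | nil => rfl
      | cons a l => rw [hwin] at hm; simp at hm
    subst hwin; subst hwout
    refine ⟨[], [], by simp [shrinkL], ?_⟩
    rw [machineB.eq_def]
    simp [shrinkL]
  | succ m ih =>
    intro win wout wsum c hm
    by_cases hcond : wsum > n ∧ (wout ≠ [] ∨ win ≠ [])
    · rcases List.eq_nil_or_concat wout with hwo | ⟨ys, y, rfl⟩
      · -- wout empty: flip win, then evict its front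
        subst hwo
        have hwin : win ≠ [] := by
          rcases hcond.2 with h | h
          · exact absurd rfl h
          · exact h
        rcases List.exists_cons_of_ne_nil hwin with ⟨x, xs, rfl⟩
        have hstep : machineB n queue (x :: xs) [] wsum c false
            = machineB n queue [] xs.reverse (wsum - x) c false := by
          rw [machineB.eq_def]
          rw [if_pos (Or.inr rfl)]
          simp only [Bool.false_eq_true, if_false]
          rw [if_pos hcond]
          simp only [if_true]
          split
          · next w rest hq =>
              rw [popLast?_reverse_cons] at hq
              simp only [Option.some.injEq, Prod.mk.injEq] at hq
              rw [← hq.1, ← hq.2]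
          · next hq =>
              rw [popLast?_reverse_cons] at hq
              simp at hq
        have hshr : shrinkL n (List.reverse [] ++ x :: xs) wsum
            = shrinkL n (List.reverse xs.reverse ++ []) (wsum - x) := by
          simp [shrinkL, hcond.1]
        rcases ih [] xs.reverse (wsum - x) c (by simp at hm ⊢; omega) with ⟨win', wout', hcat, heq⟩
        exact ⟨win', wout', by rw [hshr]; exact hcat, by rw [hstep, heq, hshr]⟩
      · -- wout nonempty: evict its top
        simp only [List.concat_eq_append] at hm hcond ⊢
        have hstep : machineB n queue win (ys ++ [y]) wsum c false
            = machineB n queue win ys (wsum - y) c false := by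
          rw [machineB.eq_def]
          rw [if_pos (Or.inr rfl)]
          simp only [Bool.false_eq_true, if_false]
          rw [if_pos hcond, if_neg (by simp)]
          split
          · next w rest hq =>
              rw [popLast?_concat] at hq
              simp only [Option.some.injEq, Prod.mk.injEq] at hq
              rw [← hq.1, ← hq.2]
          · next hq =>
              rw [popLast?_concat] at hq
              simp at hq
        have hshr : shrinkL n ((ys ++ [y]).reverse ++ win) wsum
            = shrinkL n (ys.reverse ++ win) (wsum - y) := by
          have h1 : (ys ++ [y]).reverse ++ win = y :: (ys.reverse ++ win) := by simp
          rw [h1]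
          simp only [shrinkL]
          rw [if_pos hcond.1]
        rcases ih win ys (wsum - y) c (by simp at hm ⊢; omega) with ⟨win', wout', hcat, heq⟩
        exact ⟨win', wout', by rw [hshr]; exact hcat, by rw [hstep, heq, hshr]⟩
    · -- close: count once and re-enter grow
      have hid : shrinkL n (wout.reverse ++ win) wsum = (wout.reverse ++ win, wsum) := by
        apply shrinkL_id
        intro ⟨h1, h2⟩
        apply hcond
        refine ⟨h1, ?_⟩
        by_cases hw : wout = []
        · right
          intro hwin
          exact h2 (by simp [hw, hwin])
        · left; exact hw
      refine ⟨win, wout, by rw [hid], ?_⟩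
      rw [machineB.eq_def]
      rw [if_pos (Or.inr rfl)]
      simp only [Bool.false_eq_true, if_false]
      rw [if_neg (by intro hc; exact hcond ⟨hc.1, hc.2⟩), hid]

-- joint invariant: at every grow point the machine's queue is the (reversed) unread suffix
-- and its two-stack window materializes the slice primes[start..k), matching A's (start, cur)
theorem main_sim (n : Int) (primes : List Int) :
    ∀ (l : List Int) (k : Nat) (start c : Int) (win wout : List Int),
      primes.drop k = l → 0 ≤ start → start ≤ (k : Int) →
      wout.reverse ++ win = (primes.take k).drop start.toNat →
      machineB n l.reverse win wout (((primes.take k).drop start.toNat).sum) c true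
        = ((PySem.List.pyRange (k : Int) (primes.length : Int) 1).foldl (fA n primes)
            (c, start, ((primes.take k).drop start.toNat).sum)).1 := by
  intro l
  induction l with
  | nil =>
    intro k start c win wout hdrop h0 h1 hwin
    have hk : primes.length ≤ k := by
      by_contra h
      have := congrArg List.length hdrop
      simp [List.length_drop] at this
      omega
    rw [machineB.eq_def]
    rw [if_neg (by simp)]
    rw [PySem.List.pyRange_one_eq_nil (by exact_mod_cast hk)]
    simp
  | cons q qs ih =>
    intro k start c win wout hdrop h0 h1 hwin
    have hk : k < primes.length := by
      by_contra h
      rw [List.drop_eq_nil_of_le (by omega)] at hdrop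
      exact List.cons_ne_nil q qs hdrop.symm
    have hq : primes[k]? = some q := by
      have h0' : (List.drop k primes)[0]? = primes[k + 0]? := List.getElem?_drop
      rw [hdrop] at h0'
      simpa using h0'.symm
    have hget : primes[k] = q := by
      rw [List.getElem?_eq_getElem hk] at hq
      exact Option.some.inj hq
    have hdrop' : primes.drop (k + 1) = qs := by
      have h' : primes.drop (k + 1) = (primes.drop k).tail := by
        rw [← List.drop_drop]; simp
      rw [h', hdrop]; rfl
    have htake : primes.take (k + 1) = primes.take k ++ [primes[k]] := by
      rw [List.take_succ]
      simp [List.getElem?_eq_getElem hk]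
    have hlenk : (primes.take k).length = k := by
      simp [List.length_take]; omega
    have hseg' : (primes.take k).drop start.toNat ++ [q]
        = (primes.take (k + 1)).drop start.toNat := by
      rw [htake, List.drop_append_of_le_length (by omega), hget]
    have hsum' : ((primes.take k).drop start.toNat).sum + q
        = ((primes.take (k + 1)).drop start.toNat).sum := by
      rw [← hseg', List.sum_append]
      simp
    -- one B absorb step
    have hstep : machineB n (q :: qs).reverse win wout
          (((primes.take k).drop start.toNat).sum) c true
        = machineB n qs.reverse (win ++ [q]) wout
            ((((primes.take k).drop start.toNat).sum) + q) c false := by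
      rw [machineB.eq_def]
      rw [if_pos (Or.inl (by simp))]
      simp only [if_true]
      split
      · next p qs' hq =>
          rw [popLast?_reverse_cons] at hq
          simp only [Option.some.injEq, Prod.mk.injEq] at hq
          rw [← hq.1, ← hq.2]
      · next hq =>
          rw [popLast?_reverse_cons] at hq
          simp at hq
    rw [hstep]
    -- B's flip/evict phase = shrinkL on the logical window; shrinkA corresponds
    rcases machineB_evict n qs.reverse ((win ++ [q]).length + wout.length) (win ++ [q]) wout
        (((primes.take k).drop start.toNat).sum + q) c rfl with ⟨win', wout', hcat, heq⟩
    have hwin' : wout.reverse ++ (win ++ [q]) = (primes.take (k + 1)).drop start.toNat := by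
      rw [← List.append_assoc, hwin, hseg']
    rw [hwin', hsum'] at heq hcat
    rw [hsum', heq]
    rcases shrink_corr n primes k hk (((k : Int) + 1) - start).toNat start h0 (by omega)
        rfl with ⟨s', hs0, hs1, hA, hL⟩
    rw [hL] at heq hcat ⊢
    -- one A step
    have hklt : (k : Int) < (primes.length : Int) := by exact_mod_cast hk
    rw [PySem.List.pyRange_one_cons hklt]
    simp only [List.foldl_cons]
    have hgk : PySem.List.pyGetD primes (k : Int) 0 = primes[k] :=
      PySem.List.pyGetD_eq_getElem primes 0 (by omega) (by exact_mod_cast hk)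
    have hbody : fA n primes (c, start, ((primes.take k).drop start.toNat).sum) (k : Int)
        = (c + (if ((primes.take (k + 1)).drop s'.toNat).sum = n then 1 else 0), s',
           ((primes.take (k + 1)).drop s'.toNat).sum) := by
      simp only [fA]
      rw [hgk, hget, hsum', hA]
    rw [hbody]
    have hcast : ((k : Int) + 1) = ((k + 1 : Nat) : Int) := by push_cast; ring
    have := ih (k + 1) s' (c + (if ((primes.take (k + 1)).drop s'.toNat).sum = n then 1 else 0))
        win' wout' hdrop' hs0 (by push_cast; omega) hcat
    rw [this, hcast]

-- ===== VERDICT (by name: the statement is the Claim_ definition above) =====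
theorem count_prime_sums_spec : Claim_equal_count_prime_sums := by
  intro n primes _
  unfold Spec_count_prime_sums
  rw [count_A_eq]
  unfold count_prime_sums_alt
  have := (main_sim n primes primes 0 0 0 [] [] rfl le_rfl le_rfl (by simp)).symm
  simpa using this
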